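-- pv_equiv track=rewrite | github.com/Herbping/Nope | old/grammar_writer.py | get_distr
-- ===== SOURCE A (Python) =====
-- import copy
--
-- def get_distr(arity, sum, current_index, pattern):
--     result = []
--     if arity - 1 > current_index:
--         for i in range(0,sum):
--             tmp_pattern = copy.deepcopy(pattern)
--             tmp_pattern.append(i)
--             result.extend(get_distr(arity,sum-i,current_index+1,tmp_pattern))
--         if sum == 0:
--             tmp_pattern = copy.deepcopy(pattern)
--             tmp_pattern.append(0)
--             result.extend(get_distr(arity,0,current_index+1,tmp_pattern))
--         return result
--     else:
--         tmp_pattern = copy.deepcopy(pattern)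
--         tmp_pattern.append(sum)
--         return tmp_pattern
-- ===== SOURCE B (Python) =====
-- def get_distr(arity, sum, current_index, pattern):
--     # level-by-level (BFS) expansion of the composition tree; no recursion, no deepcopy
--     frontier = [(sum, list(pattern))]
--     for _ in range(arity - 1 - current_index):
--         if not frontier:
--             break
--         nxt = []
--         for rem, pat in frontier:
--             if rem == 0:
--                 nxt.append((0, pat + [0]))
--             else:
--                 for i in range(rem):
--                     nxt.append((rem - i, pat + [i]))
--         frontier = nxt
--     result = []
--     for rem, pat in frontier:
--         result.extend(pat + [rem])
--     return result
-- ===== Notes on version B (the rewrite author's own statement) =====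
-- stated objective: alternative
-- what changed: Replaces the DFS recursion (with copy.deepcopy at every node) by an iterative level-by-level (BFS) expansion of a frontier of (remaining, partial-pattern) pairs, emitting the flat result from the final frontier.
import Mathlib
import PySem

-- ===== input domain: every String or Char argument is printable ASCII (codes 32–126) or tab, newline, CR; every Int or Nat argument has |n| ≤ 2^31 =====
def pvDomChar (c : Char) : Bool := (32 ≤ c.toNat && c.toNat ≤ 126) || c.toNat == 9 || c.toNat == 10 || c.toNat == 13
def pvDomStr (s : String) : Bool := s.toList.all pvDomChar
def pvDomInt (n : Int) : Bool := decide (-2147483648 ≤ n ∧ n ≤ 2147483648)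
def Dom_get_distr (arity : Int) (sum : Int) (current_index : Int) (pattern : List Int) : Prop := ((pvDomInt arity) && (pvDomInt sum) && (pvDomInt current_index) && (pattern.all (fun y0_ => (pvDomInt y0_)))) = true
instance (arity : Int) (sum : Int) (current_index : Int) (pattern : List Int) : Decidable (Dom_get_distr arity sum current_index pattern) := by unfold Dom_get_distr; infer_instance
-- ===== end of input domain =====

-- B replaces A's DFS recursion by an iterative level-by-level frontier expansion (no recursion, no deepcopy).

-- ===== PORT A =====
def get_distr (arity : Int) (sum : Int) (current_index : Int) (pattern : List Int) : List Int :=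
  if arity - 1 > current_index then
    let result := (PySem.List.pyRange 0 sum 1).foldl
      (fun acc i => acc ++ get_distr arity (sum - i) (current_index + 1) (pattern ++ [i])) []
    if sum = 0 then result ++ get_distr arity 0 (current_index + 1) (pattern ++ [0])
    else result
  else pattern ++ [sum]
termination_by (arity - 1 - current_index).toNat
decreasing_by all_goals omega

-- ===== PORT B =====
-- one frontier frame = (remaining, partial pattern); expand one frame into its children
def gdExpand (rem : Int) (pat : List Int) : List (Int × List Int) :=
  if rem = 0 then [(0, pat ++ [0])]
  else (PySem.List.pyRange 0 rem 1).map (fun i => (rem - i, pat ++ [i]))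

def gdStep (fr : List (Int × List Int)) : List (Int × List Int) :=
  fr.flatMap (fun rp => gdExpand rp.1 rp.2)

-- 'for _ in range(n): frontier = step(frontier)'
def gdLoop : Nat → List (Int × List Int) → List (Int × List Int)
  | 0, fr => fr
  | n + 1, fr => if fr.isEmpty then fr else gdLoop n (gdStep fr)

def get_distr_alt (arity : Int) (sum : Int) (current_index : Int) (pattern : List Int) : List Int :=
  (gdLoop (arity - 1 - current_index).toNat [(sum, pattern)]).flatMap (fun rp => rp.2 ++ [rp.1])

-- ===== PRECONDITION & SPEC =====
def Spec_get_distr (arity : Int) (sum : Int) (current_index : Int) (pattern : List Int) (out : List Int) : Prop := out = get_distr_alt arity sum current_index pattern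
instance (arity : Int) (sum : Int) (current_index : Int) (pattern : List Int) (out : List Int) : Decidable (Spec_get_distr arity sum current_index pattern out) := by unfold Spec_get_distr; infer_instance

-- ===== CLAIM (what is proved, stated in full; the proofs are below) =====
def Claim_equal_get_distr : Prop := ∀ (arity : Int) (sum : Int) (current_index : Int) (pattern : List Int), Dom_get_distr arity sum current_index pattern → Spec_get_distr arity sum current_index pattern (get_distr arity sum current_index pattern)

-- ===== LEMMAS AND PROOFS =====
-- plain (break-free) iteration, used only in the proofs
def gdIter : Nat → List (Int × List Int) → List (Int × List Int)
  | 0, fr => fr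
  | n + 1, fr => gdIter n (gdStep fr)

theorem gdIter_nil (n : Nat) : gdIter n [] = [] := by
  induction n with
  | zero => rfl
  | succ n ih => simpa [gdIter, gdStep] using ih

theorem gdLoop_eq_gdIter (n : Nat) (fr : List (Int × List Int)) : gdLoop n fr = gdIter n fr := by
  induction n generalizing fr with
  | zero => rfl
  | succ n ih =>
      rw [gdLoop, gdIter]
      rcases fr with _ | ⟨x, rest⟩
      · simp [gdStep, gdIter_nil]
      · simp [ih]

theorem gdIter_append (n : Nat) (xs ys : List (Int × List Int)) :
    gdIter n (xs ++ ys) = gdIter n xs ++ gdIter n ys := by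
  induction n generalizing xs ys with
  | zero => rfl
  | succ n ih => simp [gdIter, gdStep, ih]

-- emission distributes over the frontier frames
theorem gdIter_flat (n : Nat) (l : List (Int × List Int)) :
    (gdIter n l).flatMap (fun rp => rp.2 ++ [rp.1])
      = l.flatMap (fun rp => (gdIter n [rp]).flatMap (fun rp => rp.2 ++ [rp.1])) := by
  induction l with
  | nil => simp [gdIter_nil]
  | cons x rest ih =>
      have : x :: rest = [x] ++ rest := rfl
      rw [this, gdIter_append, List.flatMap_append, ih, List.flatMap_append]
      simp

theorem get_distr_eq_loop (arity : Int) :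
    ∀ (d : Nat) (sum ci : Int) (pat : List Int), (arity - 1 - ci).toNat = d →
      get_distr arity sum ci pat
        = (gdIter d [(sum, pat)]).flatMap (fun rp => rp.2 ++ [rp.1]) := by
  intro d
  induction d with
  | zero =>
      intro sum ci pat hd
      have hle : ¬ arity - 1 > ci := by omega
      rw [get_distr]
      simp [hle, gdIter]
  | succ d ih =>
      intro sum ci pat hd
      have hgt : arity - 1 > ci := by omega
      have hci : (arity - 1 - (ci + 1)).toNat = d := by omega
      rw [get_distr]
      simp only [hgt, if_true]
      have hfold : (PySem.List.pyRange 0 sum 1).foldl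
          (fun acc i => acc ++ get_distr arity (sum - i) (ci + 1) (pat ++ [i])) []
            = (PySem.List.pyRange 0 sum 1).flatMap
                (fun i => get_distr arity (sum - i) (ci + 1) (pat ++ [i])) := by
        simpa using PySem.List.foldl_append_eq_flatMap
          (fun i => get_distr arity (sum - i) (ci + 1) (pat ++ [i]))
          (PySem.List.pyRange 0 sum 1) []
      have hstep : gdIter (d + 1) [(sum, pat)] = gdIter d (gdExpand sum pat) := by
        simp [gdIter, gdStep]
      rw [hstep, gdIter_flat]
      by_cases hs : sum = 0
      · subst hs
        simp only [if_true]
        rw [hfold]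
        simp [gdExpand, PySem.List.pyRange_one_eq_nil (by omega : (0:Int) ≤ 0),
          ih 0 (ci + 1) (pat ++ [0]) hci]
      · simp only [hs, if_false]
        rw [hfold]
        have hexp : gdExpand sum pat
            = (PySem.List.pyRange 0 sum 1).map (fun i => (sum - i, pat ++ [i])) := by
          simp [gdExpand, hs]
        rw [hexp, List.flatMap_map]
        refine List.flatMap_congr ?_
        intro i _
        exact ih (sum - i) (ci + 1) (pat ++ [i]) hci

-- ===== VERDICT (by name: the statement is the Claim_ definition above) =====
theorem get_distr_spec : Claim_equal_get_distr := by
  intro arity sum ci pat _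
  unfold Spec_get_distr get_distr_alt
  rw [gdLoop_eq_gdIter]
  exact get_distr_eq_loop arity (arity - 1 - ci).toNat sum ci pat rfl
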